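-- pv_equiv track=rewrite | github.com/ekazakos/grove | infer_vidstg.py | sliding_segment_with_mask
-- ===== SOURCE A (Python) =====
-- def sliding_segment_with_mask(num_frames=48, num_segments=8):
--     """
--     Apply the VLM model using a sliding window approach within segments,
--     ensuring all frames are covered. Also returns a mask for non-repeating elements.
--
--     :param num_frames: total number of frames in the video
--     :param num_segments: number of segments to divide the video into (default 8)
--     :return: tuple (all_indices, masks)
--         all_indices: list of lists, each containing frame indices for sampling
--         masks: list of lists, with 1's for non-repeating elements and 0's for repeating
--     """
--     if num_frames <= num_segments:
--         # Case where num_frames <= num_segments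
--         all_indices = [list(range(num_frames)) + [num_frames - 1] * (num_segments - num_frames)]
--         masks = [[1 if i < num_frames else 0 for i in range(num_segments)]]
--         return all_indices, masks
--
--     segment_size = num_frames // num_segments
--     remainder = num_frames % num_segments
--     all_indices = []
--     masks = []
--
--     # Track which frames have been seen
--     seen_frames = set()
--
--     # Handle the main part of the video
--     for offset in range(segment_size):
--         frame_indices = [i * segment_size + offset for i in range(num_segments)]
--         mask = [1 if idx not in seen_frames else 0 for idx in frame_indices]
--         all_indices.append(frame_indices)
--         masks.append(mask)
--         seen_frames.update(frame_indices)
--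
--     # Handle the remaining frames
--     if remainder > 0:
--         for offset in range(remainder):
--             frame_indices = [i * segment_size + segment_size + offset for i in range(num_segments)]
--             frame_indices = [idx for idx in frame_indices if idx < num_frames]
--             if frame_indices:
--                 mask = [1 if idx not in seen_frames else 0 for idx in frame_indices]
--                 all_indices.append(frame_indices)
--                 masks.append(mask)
--                 seen_frames.update(frame_indices)
--
--     return all_indices, masks
-- ===== SOURCE B (Python) =====
-- def sliding_segment_with_mask(num_frames=48, num_segments=8):
--     """Closed-form rebuild: main windows are provably duplicate-free (all-ones masks)
--     and each remainder window keeps all its indices with exactly the last one new,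
--     so no seen-frames set is ever allocated."""
--     if num_frames <= num_segments:
--         kept = max(num_frames, 0)
--         row = list(range(num_frames)) + [num_frames - 1] * (num_segments - num_frames)
--         return [row], [[1] * kept + [0] * (num_segments - kept)]
--
--     segment_size = num_frames // num_segments
--     remainder = num_frames % num_segments
--
--     all_indices = [[i * segment_size + offset for i in range(num_segments)]
--                    for offset in range(segment_size)]
--     masks = [[1] * num_segments for _ in range(segment_size)]
--
--     for offset in range(remainder):
--         all_indices.append([(i + 1) * segment_size + offset for i in range(num_segments)])
--         masks.append([0] * (num_segments - 1) + [1])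
--
--     return all_indices, masks
-- ===== Notes on version B (the rewrite author's own statement) =====
-- stated objective: simpler
-- what changed: B drops A's seen-frames set and per-element membership tests entirely: the main windows are emitted by a direct comprehension with all-ones masks (their frames are provably distinct), and each remainder window keeps all its indices with the closed-form mask 0...01, since exactly its last frame is new.
import Mathlib
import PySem

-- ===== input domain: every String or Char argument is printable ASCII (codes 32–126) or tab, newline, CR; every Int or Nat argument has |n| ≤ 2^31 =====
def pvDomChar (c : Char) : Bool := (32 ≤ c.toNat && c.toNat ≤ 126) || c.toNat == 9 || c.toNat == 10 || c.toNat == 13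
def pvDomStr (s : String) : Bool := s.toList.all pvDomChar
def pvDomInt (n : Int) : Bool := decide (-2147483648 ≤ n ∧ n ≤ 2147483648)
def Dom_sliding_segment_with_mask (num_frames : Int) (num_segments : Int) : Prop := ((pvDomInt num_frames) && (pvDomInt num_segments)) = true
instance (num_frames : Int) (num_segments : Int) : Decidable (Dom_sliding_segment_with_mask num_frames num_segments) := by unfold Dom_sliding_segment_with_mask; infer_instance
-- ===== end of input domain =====

-- B replaces A's seen-frames set and per-element membership tests with closed-form masks (objective: simpler).

-- ===== PORT A =====
-- body of A's main for-loop (append row, mask from the seen set, update the set)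
def pvStepMain (num_segments seg : Int)
    (st : List (List Int) × List (List Int) × PySem.Set Int) (off : Int) :
    List (List Int) × List (List Int) × PySem.Set Int :=
  let fi := (PySem.List.pyRange 0 num_segments 1).map (fun i => i * seg + off)
  let mask := fi.map (fun idx => if !(PySem.Set.contains st.2.2 idx) then (1 : Int) else 0)
  (st.1 ++ [fi], st.2.1 ++ [mask], PySem.Set.update st.2.2 fi)

-- body of A's remainder for-loop (filter idx < num_frames, skip empty rows)
def pvStepRem (num_frames num_segments seg : Int)
    (st : List (List Int) × List (List Int) × PySem.Set Int) (off : Int) :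
    List (List Int) × List (List Int) × PySem.Set Int :=
  let fi := (PySem.List.pyRange 0 num_segments 1).map (fun i => i * seg + seg + off)
  let fi2 := fi.filter (fun idx => decide (idx < num_frames))
  if fi2.isEmpty then st
  else
    let mask := fi2.map (fun idx => if !(PySem.Set.contains st.2.2 idx) then (1 : Int) else 0)
    (st.1 ++ [fi2], st.2.1 ++ [mask], PySem.Set.update st.2.2 fi2)

def sliding_segment_with_mask (num_frames : Int) (num_segments : Int) : List (List Int) × List (List Int) :=
  if num_frames ≤ num_segments then
    ([PySem.List.pyRange 0 num_frames 1 ++ List.replicate (num_segments - num_frames).toNat (num_frames - 1)],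
     [(PySem.List.pyRange 0 num_segments 1).map (fun i => if i < num_frames then (1 : Int) else 0)])
  else
    let seg := PySem.Int.floordiv num_frames num_segments
    let rem := PySem.Int.mod num_frames num_segments
    let st := (PySem.List.pyRange 0 seg 1).foldl (pvStepMain num_segments seg)
      ([], [], PySem.Set.empty)
    let st2 := if rem > 0 then
        (PySem.List.pyRange 0 rem 1).foldl (pvStepRem num_frames num_segments seg) st
      else st
    (st2.1, st2.2.1)

-- ===== PORT B =====
def sliding_segment_with_mask_alt (num_frames : Int) (num_segments : Int) : List (List Int) × List (List Int) :=
  if num_frames ≤ num_segments then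
    let kept := max num_frames 0
    ([PySem.List.pyRange 0 num_frames 1 ++ List.replicate (num_segments - num_frames).toNat (num_frames - 1)],
     [List.replicate kept.toNat (1 : Int) ++ List.replicate (num_segments - kept).toNat 0])
  else
    let seg := PySem.Int.floordiv num_frames num_segments
    let rem := PySem.Int.mod num_frames num_segments
    let all0 := (PySem.List.pyRange 0 seg 1).map
      (fun off => (PySem.List.pyRange 0 num_segments 1).map (fun i => i * seg + off))
    let msk0 := (PySem.List.pyRange 0 seg 1).map
      (fun _ => List.replicate num_segments.toNat (1 : Int))
    (PySem.List.pyRange 0 rem 1).foldl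
      (fun (st : List (List Int) × List (List Int)) off =>
        (st.1 ++ [(PySem.List.pyRange 0 num_segments 1).map (fun i => (i + 1) * seg + off)],
         st.2 ++ [List.replicate (num_segments - 1).toNat (0 : Int) ++ [1]]))
      (all0, msk0)

-- ===== PRECONDITION & SPEC =====
-- Pre_ excludes exactly the inputs where A raises ZeroDivisionError (num_segments = 0 with num_frames > num_segments).
def Pre_sliding_segment_with_mask (num_frames : Int) (num_segments : Int) : Prop :=
  num_segments ≠ 0 ∨ num_frames ≤ num_segments
instance (num_frames : Int) (num_segments : Int) : Decidable (Pre_sliding_segment_with_mask num_frames num_segments) := by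
  unfold Pre_sliding_segment_with_mask; infer_instance

def pvWitness_sliding_segment_with_mask : Int × Int := (48, 8)

def Spec_sliding_segment_with_mask (num_frames : Int) (num_segments : Int) (out : List (List Int) × List (List Int)) : Prop := out = sliding_segment_with_mask_alt num_frames num_segments
instance (num_frames : Int) (num_segments : Int) (out : List (List Int) × List (List Int)) : Decidable (Spec_sliding_segment_with_mask num_frames num_segments out) := by unfold Spec_sliding_segment_with_mask; infer_instance

-- ===== CLAIM (what is proved, stated in full; the proofs are below) =====
def Claim_equal_sliding_segment_with_mask : Prop := ∀ (num_frames : Int) (num_segments : Int), Dom_sliding_segment_with_mask num_frames num_segments → Pre_sliding_segment_with_mask num_frames num_segments → Spec_sliding_segment_with_mask num_frames num_segments (sliding_segment_with_mask num_frames num_segments)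

-- ===== LEMMAS AND PROOFS =====

-- first-branch masks agree
lemma pv_maskrow (n : Nat) (nf : Int) :
    (List.range n).map (fun (k : Nat) => if (k : Int) < nf then (1 : Int) else 0)
      = List.replicate (min (max nf 0).toNat n) 1 ++ List.replicate (n - (max nf 0).toNat) 0 := by
  induction n with
  | zero => simp
  | succ n ih =>
    rw [List.range_succ, List.map_append, ih]
    by_cases h : (n : Int) < nf
    · have h1 : min (max nf 0).toNat (n+1) = min (max nf 0).toNat n + 1 := by omega
      have h2 : n + 1 - (max nf 0).toNat = 0 := by omega
      have h3 : n - (max nf 0).toNat = 0 := by omega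
      simp [h, h1, h2, h3, List.replicate_succ']
      omega
    · have h1 : min (max nf 0).toNat (n+1) = min (max nf 0).toNat n := by omega
      have h2 : n + 1 - (max nf 0).toNat = (n - (max nf 0).toNat) + 1 := by omega
      simp [h, h1, h2, List.replicate_succ']

-- pair-append foldl (B's remainder loop) is two maps
lemma pv_foldl_pair (l : List Int) (f g : Int → List Int) (a b : List (List Int)) :
    l.foldl (fun st off => (st.1 ++ [f off], st.2 ++ [g off])) (a, b)
      = (a ++ l.map f, b ++ l.map g) := by
  induction l generalizing a b with
  | nil => simp
  | cons x l ih => simp [ih]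

-- seen-set characterisation after one more main-loop offset
lemma pv_char_step (ns seg k x : Int) (hns : 1 ≤ ns) (hseg : 1 ≤ seg) (hk : 0 ≤ k) (hk2 : k < seg) :
    ((0 ≤ x ∧ x < ns * seg ∧ x % seg < k) ∨ (∃ i, (0 ≤ i ∧ i < ns) ∧ x = i * seg + k)) ↔
      (0 ≤ x ∧ x < ns * seg ∧ x % seg < k + 1) := by
  constructor
  · rintro (⟨h1, h2, h3⟩ | ⟨i, ⟨hi1, hi2⟩, rfl⟩)
    · exact ⟨h1, h2, by omega⟩
    · have p1 : 0 ≤ i * seg := mul_nonneg hi1 (by omega)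
      have p2 : i * seg ≤ (ns - 1) * seg := mul_le_mul_of_nonneg_right (by omega) (by omega)
      have p3 : (ns - 1) * seg = ns * seg - seg := by ring
      have p4 : (i * seg + k) % seg = k % seg := by simp
      have p5 : k % seg = k := Int.emod_eq_of_lt hk hk2
      refine ⟨by omega, by omega, by omega⟩
  · rintro ⟨h1, h2, h3⟩
    by_cases h : x % seg < k
    · exact Or.inl ⟨h1, h2, h⟩
    · have hx : x % seg = k := by omega
      refine Or.inr ⟨x / seg, ⟨Int.ediv_nonneg h1 (by omega), ?_⟩, ?_⟩
      · by_contra hc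
        push_neg at hc
        have h4 : ns * seg ≤ (x / seg) * seg := mul_le_mul_of_nonneg_right hc (by omega)
        have hd : seg * (x / seg) + x % seg = x := Int.ediv_add_emod x seg
        have h5 : (x / seg) * seg = seg * (x / seg) := by ring
        omega
      · have hd : seg * (x / seg) + x % seg = x := Int.ediv_add_emod x seg
        have h5 : (x / seg) * seg = seg * (x / seg) := by ring
        omega

-- main-loop invariant of A: rows as in B, masks all ones, seen = {x | 0 ≤ x < ns*seg, x % seg < k}
lemma pv_mainloop (ns seg : Int) (hns : 1 ≤ ns) (hseg : 1 ≤ seg) :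
    ∀ k : Nat, (k : Int) ≤ seg →
    ∃ s : PySem.Set Int,
      (PySem.List.pyRange 0 (k : Int) 1).foldl (pvStepMain ns seg) ([], [], PySem.Set.empty)
        = ((PySem.List.pyRange 0 (k : Int) 1).map
             (fun off => (PySem.List.pyRange 0 ns 1).map (fun i => i * seg + off)),
           (PySem.List.pyRange 0 (k : Int) 1).map (fun _ => List.replicate ns.toNat (1 : Int)),
           s)
      ∧ (∀ x : Int, x ∈ s ↔ 0 ≤ x ∧ x < ns * seg ∧ x % seg < (k : Int)) := by
  intro k
  induction k with
  | zero =>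
    intro _
    refine ⟨PySem.Set.empty, by simp [PySem.List.pyRange_one_eq_nil], ?_⟩
    intro x
    have := Int.emod_nonneg x (show seg ≠ 0 by omega)
    simp [PySem.Set.empty]
    omega
  | succ k ih =>
    intro hk
    push_cast at hk ⊢
    obtain ⟨s, heq, hchar⟩ := ih (by omega)
    rw [PySem.List.pyRange_one_succ_right (by positivity), List.foldl_append, heq]
    have hnotmem : ∀ idx ∈ (PySem.List.pyRange 0 ns 1).map (fun i => i * seg + (k : Int)), idx ∉ s := by
      intro idx hidx
      obtain ⟨i, hi, rfl⟩ := List.mem_map.mp hidx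
      rw [PySem.List.mem_pyRange_one] at hi
      rw [hchar]
      have p4 : (i * seg + (k : Int)) % seg = (k : Int) % seg := by simp
      have p5 : (k : Int) % seg = (k : Int) := Int.emod_eq_of_lt (by omega) (by omega)
      omega
    refine ⟨PySem.Set.update s ((PySem.List.pyRange 0 ns 1).map (fun i => i * seg + (k : Int))), ?_, ?_⟩
    · simp only [List.foldl_cons, List.foldl_nil, pvStepMain]
      refine Prod.ext ?_ (Prod.ext ?_ rfl)
      · simp
      · simp only [List.map_append, List.map_cons, List.map_nil]
        congr 1
        have h : ∀ idx ∈ (PySem.List.pyRange 0 ns 1).map (fun i => i * seg + (k : Int)),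
            (if !(PySem.Set.contains s idx) then (1 : Int) else 0) = 1 := by
          intro idx hidx
          have := hnotmem idx hidx
          simp at this ⊢
          simpa using this
        rw [List.map_congr_left h]
        simp [Function.comp_def, List.map_const', PySem.List.length_pyRange_one]
    · intro x
      rw [PySem.Set.mem_update]
      rw [hchar]
      rw [← pv_char_step ns seg (k : Int) x hns hseg (by omega) (by omega)]
      simp only [List.mem_map, PySem.List.mem_pyRange_one]
      constructor
      · rintro (h | ⟨i, hi, rfl⟩)
        · exact Or.inl h
        · exact Or.inr ⟨i, ⟨hi.1, hi.2⟩, rfl⟩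
      · rintro (h | ⟨i, hi, rfl⟩)
        · exact Or.inl h
        · exact Or.inr ⟨i, ⟨hi.1, hi.2⟩, rfl⟩

-- seen-set characterisation after one more remainder offset
lemma pv_char_stepR (ns seg k x : Int) (hns : 1 ≤ ns) (hseg : 1 ≤ seg) (hk : 0 ≤ k) :
    ((0 ≤ x ∧ x < ns * seg + k) ∨ (∃ i, (0 ≤ i ∧ i < ns) ∧ x = i * seg + seg + k)) ↔
      (0 ≤ x ∧ x < ns * seg + (k + 1)) := by
  constructor
  · rintro (⟨h1, h2⟩ | ⟨i, ⟨hi1, hi2⟩, rfl⟩)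
    · exact ⟨h1, by omega⟩
    · have p1 : 0 ≤ i * seg := mul_nonneg hi1 (by omega)
      have p2 : i * seg ≤ (ns - 1) * seg := mul_le_mul_of_nonneg_right (by omega) (by omega)
      have p3 : (ns - 1) * seg = ns * seg - seg := by ring
      exact ⟨by omega, by omega⟩
  · rintro ⟨h1, h2⟩
    by_cases h : x < ns * seg + k
    · exact Or.inl ⟨h1, h⟩
    · refine Or.inr ⟨ns - 1, ⟨by omega, by omega⟩, ?_⟩
      have p3 : (ns - 1) * seg = ns * seg - seg := by ring
      omega

-- a 0/1 row whose single 1 sits at the last position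
lemma pv_lastone (m : Int) (hm : 0 ≤ m) (f : Int → Int)
    (hf : ∀ i, 0 ≤ i → i < m → f i = 0) (hl : f m = 1) :
    (PySem.List.pyRange 0 (m + 1) 1).map f = List.replicate m.toNat 0 ++ [1] := by
  rw [PySem.List.pyRange_one_succ_right (by omega)]
  simp only [List.map_append, List.map_cons, List.map_nil]
  congr 1
  · have h : ∀ i ∈ PySem.List.pyRange 0 m 1, f i = 0 := by
      intro i hi
      rw [PySem.List.mem_pyRange_one] at hi
      exact hf i hi.1 hi.2
    rw [List.map_congr_left h, List.map_const', PySem.List.length_pyRange_one]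
    norm_num
  · simp [hl]

-- remainder-loop invariant of A: every row survives the filter, mask is 0…01, seen grows by one tail frame
lemma pv_remloop (nf ns seg rem : Int) (hns : 1 ≤ ns) (hseg : 1 ≤ seg)
    (hrem : rem ≤ ns) (hnf : nf = ns * seg + rem) :
    ∀ k : Nat, (k : Int) ≤ rem →
    ∀ (A M : List (List Int)) (s : PySem.Set Int),
      (∀ x : Int, x ∈ s ↔ 0 ≤ x ∧ x < ns * seg) →
    ∃ s' : PySem.Set Int,
      (PySem.List.pyRange 0 (k : Int) 1).foldl (pvStepRem nf ns seg) (A, M, s)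
        = (A ++ (PySem.List.pyRange 0 (k : Int) 1).map
              (fun off => (PySem.List.pyRange 0 ns 1).map (fun i => i * seg + seg + off)),
           M ++ (PySem.List.pyRange 0 (k : Int) 1).map
              (fun _ => List.replicate (ns - 1).toNat (0 : Int) ++ [1]),
           s')
      ∧ (∀ x : Int, x ∈ s' ↔ 0 ≤ x ∧ x < ns * seg + (k : Int)) := by
  intro k
  induction k with
  | zero =>
    intro _ A M s hs
    refine ⟨s, by simp [PySem.List.pyRange_one_eq_nil], ?_⟩
    intro x
    rw [hs]
    omega
  | succ k ih =>
    intro hk A M s hs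
    push_cast at hk ⊢
    obtain ⟨s', heq, hchar⟩ := ih (by omega) A M s hs
    rw [PySem.List.pyRange_one_succ_right (by positivity), List.foldl_append, heq]
    simp only [List.foldl_cons, List.foldl_nil]
    have hfil : ((PySem.List.pyRange 0 ns 1).map (fun i => i * seg + seg + (k : Int))).filter
        (fun idx => decide (idx < nf)) = (PySem.List.pyRange 0 ns 1).map (fun i => i * seg + seg + (k : Int)) := by
      apply List.filter_eq_self.mpr
      intro x hx
      obtain ⟨i, hi, rfl⟩ := List.mem_map.mp hx
      rw [PySem.List.mem_pyRange_one] at hi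
      have p2 : (i + 1) * seg ≤ ns * seg := mul_le_mul_of_nonneg_right (by omega) (by omega)
      have p3 : (i + 1) * seg = i * seg + seg := by ring
      simp only [decide_eq_true_eq]
      omega
    have hne : ((PySem.List.pyRange 0 ns 1).map (fun i => i * seg + seg + (k : Int))) ≠ [] := by
      have hl : ((PySem.List.pyRange 0 ns 1).map (fun i => i * seg + seg + (k : Int))).length = (ns - 0).toNat := by
        rw [List.length_map, PySem.List.length_pyRange_one]
      intro hcon
      rw [hcon] at hl
      simp at hl
      omega
    rw [pvStepRem]
    simp only [hfil]
    rw [if_neg (by simp only [List.isEmpty_iff]; exact hne)]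
    refine ⟨PySem.Set.update s' ((PySem.List.pyRange 0 ns 1).map (fun i => i * seg + seg + (k : Int))), ?_, ?_⟩
    · refine Prod.ext ?_ (Prod.ext ?_ rfl)
      · simp
      · simp only [List.map_append, List.map_cons, List.map_nil]
        simp only [List.append_assoc]
        congr 2
        rw [List.map_map]
        have hm1 : (0 : Int) ≤ ns - 1 := by omega
        have hlast := pv_lastone (ns - 1) hm1
          (fun i => if !(PySem.Set.contains s' (i * seg + seg + (k : Int))) then (1 : Int) else 0)
          (by
            intro i hi1 hi2
            have hmem : (i * seg + seg + (k : Int)) ∈ s' := by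
              rw [hchar]
              have p1 : 0 ≤ i * seg := mul_nonneg hi1 (by omega)
              have p2 : (i + 1) * seg ≤ (ns - 1) * seg := mul_le_mul_of_nonneg_right (by omega) (by omega)
              have p3 : (i + 1) * seg = i * seg + seg := by ring
              have p4 : (ns - 1) * seg = ns * seg - seg := by ring
              omega
            have hc : PySem.Set.contains s' (i * seg + seg + (k : Int)) = true := by
              rw [PySem.Set.contains_iff]; exact hmem
            simp only [hc, Bool.not_true, if_false]
            rfl)
          (by
            have hnm : ((ns - 1) * seg + seg + (k : Int)) ∉ s' := by
              rw [hchar]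
              have p4 : (ns - 1) * seg = ns * seg - seg := by ring
              omega
            have hc : PySem.Set.contains s' ((ns - 1) * seg + seg + (k : Int)) = false := by
              by_contra hcc
              simp only [Bool.not_eq_false] at hcc
              rw [PySem.Set.contains_iff] at hcc
              exact hnm hcc
            simp only [hc, Bool.not_false, if_true]
            )
        rw [show ns - 1 + 1 = ns by ring] at hlast
        simp only [Function.comp_def]
        rw [hlast]
    · intro x
      rw [PySem.Set.mem_update, hchar]
      rw [← pv_char_stepR ns seg (k : Int) x hns hseg (by omega)]
      simp only [List.mem_map, PySem.List.mem_pyRange_one]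
      constructor
      · rintro (h | ⟨i, hi, rfl⟩)
        · exact Or.inl h
        · exact Or.inr ⟨i, ⟨hi.1, hi.2⟩, rfl⟩
      · rintro (h | ⟨i, hi, rfl⟩)
        · exact Or.inl h
        · exact Or.inr ⟨i, ⟨hi.1, hi.2⟩, rfl⟩

-- ===== VERDICT (by name: the statement is the Claim_ definition above) =====
theorem sliding_segment_with_mask_spec : Claim_equal_sliding_segment_with_mask := by
  unfold Claim_equal_sliding_segment_with_mask
  intro nf ns _ hpre
  unfold Spec_sliding_segment_with_mask
  by_cases hle : nf ≤ ns
  · simp only [sliding_segment_with_mask, sliding_segment_with_mask_alt, if_pos hle]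
    refine Prod.ext rfl ?_
    show [(PySem.List.pyRange 0 ns 1).map (fun i => if i < nf then (1 : Int) else 0)]
      = [List.replicate (max nf 0).toNat (1 : Int) ++ List.replicate (ns - max nf 0).toNat 0]
    congr 1
    rw [PySem.List.pyRange_one]
    simp only [zero_add, List.map_map, Function.comp_def, sub_zero]
    rw [pv_maskrow]
    have h1 : min (max nf 0).toNat ns.toNat = (max nf 0).toNat := by omega
    have h2 : ns.toNat - (max nf 0).toNat = (ns - max nf 0).toNat := by omega
    rw [h1, h2]
  · have hns0 : ns ≠ 0 := by
      rcases hpre with h | h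
      · exact h
      · exact absurd h hle
    simp only [sliding_segment_with_mask, sliding_segment_with_mask_alt, if_neg hle]
    push_neg at hle
    by_cases hpos : 1 ≤ ns
    · have hseg : 1 ≤ PySem.Int.floordiv nf ns := by
        rw [PySem.Int.le_floordiv_iff_mul_le (by omega)]
        omega
      set seg := PySem.Int.floordiv nf ns with hsegdef
      set rem := PySem.Int.mod nf ns with hremdef
      have hrem0 : 0 ≤ rem := PySem.Int.mod_nonneg nf (by omega)
      have hremlt : rem < ns := PySem.Int.mod_lt nf (by omega)
      have hnfeq : nf = ns * seg + rem := by
        have h := PySem.Int.floordiv_mul_add_mod nf ns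
        rw [mul_comm] at h
        linarith
      obtain ⟨s, heq, hchar⟩ := pv_mainloop ns seg hpos hseg seg.toNat (by omega)
      have hc : ((seg.toNat : Nat) : Int) = seg := by omega
      rw [hc] at heq hchar
      have hchar' : ∀ x, x ∈ s ↔ 0 ≤ x ∧ x < ns * seg := by
        intro x
        rw [hchar x]
        have e1 := Int.emod_nonneg x (show seg ≠ 0 by omega)
        have e2 := Int.emod_lt_of_pos x (show 0 < seg by omega)
        constructor
        · rintro ⟨a, b, _⟩; exact ⟨a, b⟩
        · rintro ⟨a, b⟩; exact ⟨a, b, by omega⟩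
      rw [heq]
      by_cases hr : rem > 0
      · rw [if_pos hr]
        obtain ⟨s', heq2, _⟩ := pv_remloop nf ns seg rem hpos hseg (by omega) hnfeq
          rem.toNat (by omega) _ _ s hchar'
        have hc2 : ((rem.toNat : Nat) : Int) = rem := by omega
        rw [hc2] at heq2
        rw [heq2, pv_foldl_pair]
        refine Prod.ext ?_ rfl
        show _ ++ (PySem.List.pyRange 0 rem 1).map
            (fun off => (PySem.List.pyRange 0 ns 1).map (fun i => i * seg + seg + off)) = _
        congr 1
        apply List.map_congr_left
        intro off _
        apply List.map_congr_left
        intro i _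
        ring
      · rw [if_neg hr]
        have hr0 : rem = 0 := by omega
        rw [hr0, PySem.List.pyRange_one_eq_nil (le_refl 0)]
        simp
    · have hnsneg : ns < 0 := by omega
      have hsegle : PySem.Int.floordiv nf ns ≤ 0 := by
        by_contra hcc
        push_neg at hcc
        have h1 := PySem.Int.floordiv_mul_add_mod nf ns
        have h2 := PySem.Int.mod_neg_bounds nf hnsneg
        have h3 : PySem.Int.floordiv nf ns * ns ≤ 1 * ns :=
          mul_le_mul_of_nonpos_right (by omega) (by omega)
        simp only [one_mul] at h3
        linarith [h2.1, h2.2]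
      have hremle := PySem.Int.mod_neg_bounds nf hnsneg
      rw [PySem.List.pyRange_one_eq_nil hsegle]
      rw [if_neg (by omega), PySem.List.pyRange_one_eq_nil (by omega : PySem.Int.mod nf ns ≤ 0)]
      simp
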